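-- pv_equiv track=rewrite | github.com/Obelix3000/EBM-Strategy-Converter | src/reorder.py | _build_modular_order
-- ===== SOURCE A (Python) =====
-- def _build_modular_order(block_size: int, forward_jump: int) -> list:
--     """Baut die deterministische modulare Besuchsreihenfolge für einen Block auf.
--     Startet bei 0, springt jeweils um forward_jump (mod block_size) weiter."""
--     seen: set = set()
--     order: list = []
--     for start in range(block_size):
--         if start in seen:
--             continue
--         cur = start
--         while cur not in seen:
--             seen.add(cur)
--             order.append(cur)
--             cur = (cur + forward_jump) % block_size
--     return order
-- ===== SOURCE B (Python) =====
-- def _build_modular_order(block_size: int, forward_jump: int) -> list: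
--     """Cycle-by-cycle construction: the orbits of x -> (x + forward_jump) % block_size
--     are the residue classes mod d = gcd(forward_jump, block_size), and the original
--     scan opens a new cycle exactly at starts 0..d-1."""
--     if block_size <= 0:
--         return []
--     a = forward_jump % block_size
--     b = block_size
--     while b:
--         a, b = b, a % b
--     d = a
--     cycle_len = block_size // d
--     order = []
--     for r in range(d):
--         cur = r
--         for _ in range(cycle_len):
--             order.append(cur)
--             cur = (cur + forward_jump) % block_size
--     return order
-- ===== Notes on version B (the rewrite author's own statement) =====
-- stated objective: faster
-- what changed: Replaces the seen-set scan over all starts by number theory: d = gcd(forward_jump, block_size) cycles of length block_size//d are emitted directly from starts 0..d-1, eliminating the set and all membership tests.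
import Mathlib
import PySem

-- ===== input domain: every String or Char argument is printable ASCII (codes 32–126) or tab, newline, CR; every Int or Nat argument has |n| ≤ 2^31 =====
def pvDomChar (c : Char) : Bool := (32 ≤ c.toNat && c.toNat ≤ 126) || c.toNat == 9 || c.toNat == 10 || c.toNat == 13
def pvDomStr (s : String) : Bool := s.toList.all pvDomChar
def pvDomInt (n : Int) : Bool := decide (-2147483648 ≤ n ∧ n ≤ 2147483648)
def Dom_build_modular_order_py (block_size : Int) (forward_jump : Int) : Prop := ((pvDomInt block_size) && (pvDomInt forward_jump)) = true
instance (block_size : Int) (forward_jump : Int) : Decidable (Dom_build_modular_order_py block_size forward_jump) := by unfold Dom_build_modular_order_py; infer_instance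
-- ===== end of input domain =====

-- B replaces A's seen-set scan over all starts by emitting the d = gcd(forward_jump, block_size)
-- cycles of length block_size // d directly from starts 0..d-1 (objective: faster, no set operations).

-- ===== PORT A =====
-- inner 'while cur not in seen' loop; the fuel only makes the recursion total
-- (block_size + 1 steps always suffice, as the equivalence proof shows).
def aWhile (n j : Int) (fuel : Nat) (seen : PySem.Set Int) (order : List Int) (cur : Int) : PySem.Set Int × List Int :=
  match fuel with
  | 0 => (seen, order)
  | f+1 =>
    if PySem.Set.contains seen cur then (seen, order)
    else aWhile n j f (PySem.Set.add seen cur) (order ++ [cur]) (PySem.Int.mod (cur + j) n)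

def build_modular_order_py (block_size : Int) (forward_jump : Int) : List Int :=
  ((PySem.List.pyRange 0 block_size 1).foldl
    (fun (st : PySem.Set Int × List Int) start =>
      if PySem.Set.contains st.1 start then st
      else aWhile block_size forward_jump (block_size.toNat + 1) st.1 st.2 start)
    (PySem.Set.empty, [])).2

-- ===== PORT B =====
-- Euclid's 'while b: a, b = b, a % b' loop of Source B; the fuel only makes it total.
def bGcd (fuel : Nat) (a b : Int) : Int :=
  match fuel with
  | 0 => a
  | f+1 => if b == 0 then a else bGcd f b (PySem.Int.mod a b)

def build_modular_order_py_alt (block_size : Int) (forward_jump : Int) : List Int :=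
  if block_size ≤ 0 then []
  else
    let d := bGcd (block_size.toNat + 1) (PySem.Int.mod forward_jump block_size) block_size
    let cycleLen := PySem.Int.floordiv block_size d
    (PySem.List.pyRange 0 d 1).foldl
      (fun (order : List Int) r =>
        ((PySem.List.pyRange 0 cycleLen 1).foldl
          (fun (st : List Int × Int) _ =>
            (st.1 ++ [st.2], PySem.Int.mod (st.2 + forward_jump) block_size))
          (order, r)).1)
      []

-- ===== PRECONDITION & SPEC =====
def Spec_build_modular_order_py (block_size : Int) (forward_jump : Int) (out : List Int) : Prop := out = build_modular_order_py_alt block_size forward_jump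
instance (block_size : Int) (forward_jump : Int) (out : List Int) : Decidable (Spec_build_modular_order_py block_size forward_jump out) := by unfold Spec_build_modular_order_py; infer_instance

-- ===== CLAIM (what is proved, stated in full; the proofs are below) =====
def Claim_equal_build_modular_order_py : Prop := ∀ (block_size : Int) (forward_jump : Int), Dom_build_modular_order_py block_size forward_jump → Spec_build_modular_order_py block_size forward_jump (build_modular_order_py block_size forward_jump)

-- ===== LEMMAS AND PROOFS =====

-- d = gcd(j, n) as an Int, and the common cycle length L = n / d as a Nat.
def pvD (n j : Int) : Int := (Int.gcd j n : Int)
def pvL (n j : Int) : Nat := n.toNat / Int.gcd j n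
-- the k-th element of the jump orbit started at r
def pvF (n j r : Int) (k : Nat) : Int := (r + (k : Int) * j) % n
-- one full cycle of length L started at r
def pvOrb (n j : Int) (r : Int) : List Int := (List.range (pvL n j)).map (pvF n j r)
-- the concatenation of the cycles started at s, s+1, …, s+t-1
def pvBig (n j : Int) (s : Nat) : Nat → List Int
  | 0 => []
  | t+1 => pvOrb n j (s : Int) ++ pvBig n j (s+1) t
-- A's seen-set after the starts 0..s-1 have been processed
def pvInv (n j : Int) (s : Nat) (x : Int) : Prop := 0 ≤ x ∧ x < n ∧ x % pvD n j < (s : Int)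

lemma pvD_pos (n j : Int) (hn : 0 < n) : 0 < pvD n j := by
  have h : (0:Nat) < Int.gcd j n := Int.gcd_pos_iff.mpr (Or.inr (by omega))
  unfold pvD; exact_mod_cast h

lemma pvD_dvd_j (n j : Int) : pvD n j ∣ j := Int.gcd_dvd_left j n
lemma pvD_dvd_n (n j : Int) : pvD n j ∣ n := Int.gcd_dvd_right j n

lemma pvDL (n j : Int) (hn : 0 < n) : pvD n j * (pvL n j : Int) = n := by
  have habs : n.natAbs = n.toNat := by omega
  have hd : Int.gcd j n ∣ n.toNat := by
    simpa [Int.gcd, habs] using Nat.gcd_dvd_right j.natAbs n.natAbs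
  have h1 : Int.gcd j n * (n.toNat / Int.gcd j n) = n.toNat := Nat.mul_div_cancel' hd
  have h2 : ((Int.gcd j n : Int)) * ((n.toNat / Int.gcd j n : Nat) : Int) = ((n.toNat : Nat) : Int) := by
    exact_mod_cast congrArg (fun m : Nat => (m : Int)) h1
  rw [Int.toNat_of_nonneg (by omega : (0:Int) ≤ n)] at h2
  exact h2

lemma pvL_pos (n j : Int) (hn : 0 < n) : 0 < pvL n j := by
  have hD := pvD_pos n j hn
  have hDL := pvDL n j hn
  by_contra h
  have h0 : pvL n j = 0 := by omega
  rw [h0] at hDL; simp at hDL; omega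

lemma pvD_le_n (n j : Int) (hn : 0 < n) : pvD n j ≤ n :=
  Int.le_of_dvd hn (pvD_dvd_n n j)

lemma n_dvd_Lj (n j : Int) (hn : 0 < n) : n ∣ (pvL n j : Int) * j := by
  obtain ⟨c, hc⟩ := pvD_dvd_j n j
  refine ⟨c, ?_⟩
  linear_combination (pvL n j : Int) * hc + c * (pvDL n j hn)

lemma pvF_step (n j r : Int) (k : Nat) : (pvF n j r k + j) % n = pvF n j r (k+1) := by
  unfold pvF
  rw [Int.emod_add_emod]
  push_cast; ring_nf

lemma pvF_nonneg (n j r : Int) (hn : 0 < n) (k : Nat) : 0 ≤ pvF n j r k :=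
  Int.emod_nonneg _ (by omega)

lemma pvF_lt (n j r : Int) (hn : 0 < n) (k : Nat) : pvF n j r k < n :=
  Int.emod_lt_of_pos _ hn

lemma pvF_mod_D (n j r : Int) (k : Nat) : pvF n j r k % pvD n j = r % pvD n j := by
  unfold pvF
  rw [Int.emod_emod_of_dvd _ (pvD_dvd_n n j)]
  obtain ⟨c, hc⟩ := Dvd.dvd.mul_left (pvD_dvd_j n j) (k : Int)
  rw [hc, Int.add_mul_emod_self_left]

lemma pvF_zero (n j r : Int) (h0 : 0 ≤ r) (hr : r < n) : pvF n j r 0 = r := by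
  simp [pvF, Int.emod_eq_of_lt h0 hr]

lemma pvF_L (n j r : Int) (hn : 0 < n) (h0 : 0 ≤ r) (hr : r < n) : pvF n j r (pvL n j) = r := by
  unfold pvF
  obtain ⟨c, hc⟩ := n_dvd_Lj n j hn
  rw [hc, Int.add_mul_emod_self_left, Int.emod_eq_of_lt h0 hr]

lemma pvF_inj (n j r : Int) (hn : 0 < n) (i m : Nat) (him : i < m) (hm : m < pvL n j) :
    pvF n j r i ≠ pvF n j r m := by
  intro he
  have hD := pvD_pos n j hn
  have hDL := pvDL n j hn
  have h1 : ((r + (m:Int)*j) - (r + (i:Int)*j)) % n = 0 :=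
    Int.emod_eq_emod_iff_emod_sub_eq_zero.mp (by simpa [pvF] using he.symm)
  have h2 : n ∣ ((m:Int) - i) * j := by
    have he2 : (r + (m:Int)*j) - (r + (i:Int)*j) = ((m:Int) - i) * j := by ring
    rw [he2] at h1
    exact Int.dvd_of_emod_eq_zero h1
  have hDnz : pvD n j ≠ 0 := by omega
  obtain ⟨j1, hj1⟩ := pvD_dvd_j n j
  set D := pvD n j with hDdef
  have hcop : IsCoprime ((pvL n j : Nat) : Int) j1 := by
    have hg : (0:Nat) < Int.gcd j n := by
      have h := pvD_pos n j hn; unfold pvD at h; exact_mod_cast h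
    have hgcd : (j / D).gcd (n / D) = 1 := Int.gcd_div_gcd_div_gcd hg
    have hj1' : j / D = j1 := by
      rw [hj1]; exact Int.mul_ediv_cancel_left j1 hDnz
    have hL' : n / D = (pvL n j : Int) := by
      conv_lhs => rw [← pvDL n j hn]
      rw [← hDdef]
      exact Int.mul_ediv_cancel_left _ hDnz
    rw [hj1', hL'] at hgcd
    exact (Int.isCoprime_iff_gcd_eq_one.mpr (by rw [Int.gcd_comm]; exact hgcd))
  have h3 : (pvL n j : Int) ∣ ((m:Int) - i) * j1 := by
    have hDL' : n = D * (pvL n j : Int) := (pvDL n j hn).symm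
    have hdd : D * (pvL n j : Int) ∣ D * (((m:Int) - i) * j1) := by
      rw [← hDL']
      have he3 : D * (((m:Int) - i) * j1) = ((m:Int) - i) * j := by
        linear_combination (((m:Int)) - i) * hj1.symm
      rw [he3]; exact h2
    exact (mul_dvd_mul_iff_left hDnz).mp hdd
  have h4 : (pvL n j : Int) ∣ ((m:Int) - i) := hcop.dvd_of_dvd_mul_right h3
  have h5 : (pvL n j : Int) ≤ (m:Int) - i := Int.le_of_dvd (by omega) h4
  push_cast at h5; omega

lemma pvF_surj (n j r x : Int) (hn : 0 < n) (h0 : 0 ≤ r) (hrD : r < pvD n j)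
    (hx0 : 0 ≤ x) (hxn : x < n) (hxr : x % pvD n j = r) :
    ∃ k, k < pvL n j ∧ x = pvF n j r k := by
  have hD := pvD_pos n j hn
  have hDL := pvDL n j hn
  have hL := pvL_pos n j hn
  have hLz : (0:Int) < (pvL n j : Int) := by exact_mod_cast hL
  -- Bezout coefficients
  have hbez : (pvD n j : Int) = j * Int.gcdA j n + n * Int.gcdB j n := Int.gcd_eq_gcd_ab j n
  set a := Int.gcdA j n with ha
  set b := Int.gcdB j n with hb
  -- D divides x - r
  have hdvd : pvD n j ∣ x - r := by
    apply Int.dvd_of_emod_eq_zero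
    apply Int.emod_eq_emod_iff_emod_sub_eq_zero.mp
    rw [hxr, Int.emod_eq_of_lt h0 hrD]
  obtain ⟨m, hm⟩ := hdvd
  set K := (a * m) % (pvL n j : Int) with hK
  have hK0 : 0 ≤ K := Int.emod_nonneg _ (by omega)
  have hKL : K < (pvL n j : Int) := Int.emod_lt_of_pos _ hLz
  refine ⟨K.toNat, by omega, ?_⟩
  have hKt : ((K.toNat : Nat) : Int) = K := Int.toNat_of_nonneg hK0
  obtain ⟨c, hLj⟩ := n_dvd_Lj n j hn
  set q := a * m / (pvL n j : Int) with hq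
  have hKval : K = a * m - (pvL n j : Int) * q := by rw [hK, hq, Int.emod_def]
  have hAD : j * a - pvD n j = -(n * b) := by linarith [hbez]
  have key : ((r + ((K.toNat : Nat) : Int) * j) - x) % n = 0 := by
    have hexp : (r + ((K.toNat : Nat) : Int) * j) - x = n * (-(m * b) - q * c) := by
      rw [hKt, hKval]
      linear_combination m * hAD - q * hLj - hm
    rw [hexp]
    exact Int.mul_emod_right n _
  have hfin : (r + ((K.toNat : Nat) : Int) * j) % n = x % n :=
    Int.emod_eq_emod_iff_emod_sub_eq_zero.mpr key
  rw [Int.emod_eq_of_lt hx0 hxn] at hfin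
  unfold pvF
  omega

-- ===== the while loop follows one full cycle =====
lemma aWhile_run (n j : Int) (hn : 0 < n) (r : Int) (h0 : 0 ≤ r) (hrD : r < pvD n j)
    (Q : Int → Prop) (hQ : ∀ k, k < pvL n j → ¬ Q (pvF n j r k)) :
    ∀ (t m fuel : Nat) (seen : PySem.Set Int) (order : List Int),
      m + t = pvL n j → t < fuel →
      (∀ x, x ∈ seen ↔ (Q x ∨ ∃ k, k < m ∧ x = pvF n j r k)) →
      ∃ seen', aWhile n j fuel seen order (pvF n j r m) =
          (seen', order ++ (List.range t).map (fun i => pvF n j r (m + i))) ∧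
        ∀ x, x ∈ seen' ↔ (Q x ∨ ∃ k, k < pvL n j ∧ x = pvF n j r k) := by
  have hrn : r < n := lt_of_lt_of_le hrD (pvD_le_n n j hn)
  intro t
  induction t with
  | zero =>
    intro m fuel seen order hmt hf hinv
    have hm : m = pvL n j := by omega
    obtain ⟨f, rfl⟩ : ∃ f, fuel = f + 1 := ⟨fuel - 1, by omega⟩
    have hcur : pvF n j r m = r := by rw [hm]; exact pvF_L n j r hn h0 hrn
    have hmem : r ∈ seen := by
      rw [hinv]
      refine Or.inr ⟨0, ?_, (pvF_zero n j r h0 hrn).symm⟩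
      have := pvL_pos n j hn; omega
    refine ⟨seen, ?_, by intro x; rw [hinv x, hm]⟩
    rw [hcur]
    simp only [aWhile, (PySem.Set.contains_iff seen r).mpr hmem, if_true, List.range_zero,
      List.map_nil, List.append_nil]
  | succ t ih =>
    intro m fuel seen order hmt hf hinv
    obtain ⟨f, rfl⟩ : ∃ f, fuel = f + 1 := ⟨fuel - 1, by omega⟩
    have hmL : m < pvL n j := by omega
    have hnotmem : pvF n j r m ∉ seen := by
      rw [hinv]
      rintro (hQm | ⟨k, hk, hkeq⟩)
      · exact hQ m hmL hQm
      · exact pvF_inj n j r hn k m hk hmL hkeq.symm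
    have hcf : PySem.Set.contains seen (pvF n j r m) = false :=
      Bool.eq_false_iff.mpr (fun h => hnotmem ((PySem.Set.contains_iff _ _).mp h))
    simp only [aWhile, hcf, Bool.false_eq_true, if_false]
    have hnext : PySem.Int.mod (pvF n j r m + j) n = pvF n j r (m+1) := by
      rw [PySem.Int.mod_eq_emod_of_pos hn, pvF_step]
    rw [hnext]
    have hinv' : ∀ x, x ∈ PySem.Set.add seen (pvF n j r m) ↔
        (Q x ∨ ∃ k, k < m + 1 ∧ x = pvF n j r k) := by
      intro x
      rw [PySem.Set.mem_add, hinv]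
      constructor
      · rintro ((hq | ⟨k, hk, rfl⟩) | rfl)
        · exact Or.inl hq
        · exact Or.inr ⟨k, by omega, rfl⟩
        · exact Or.inr ⟨m, by omega, rfl⟩
      · rintro (hq | ⟨k, hk, rfl⟩)
        · exact Or.inl (Or.inl hq)
        · by_cases hkm : k = m
          · exact Or.inr (by rw [hkm])
          · exact Or.inl (Or.inr ⟨k, by omega, rfl⟩)
    obtain ⟨seen', heq, hinvf⟩ := ih (m+1) f (PySem.Set.add seen (pvF n j r m))
      (order ++ [pvF n j r m]) (by omega) (by omega) hinv'
    refine ⟨seen', ?_, hinvf⟩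
    rw [heq]
    have hmap : (List.range (t+1)).map (fun i => pvF n j r (m + i))
        = pvF n j r m :: (List.range t).map (fun i => pvF n j r (m + 1 + i)) := by
      rw [List.range_succ_eq_map, List.map_cons, List.map_map]
      simp only [Nat.add_zero]
      congr 1
      refine List.map_congr_left fun i _ => ?_
      simp only [Function.comp_apply]
      congr 1
      omega
    rw [hmap, List.append_assoc, List.singleton_append]

-- ===== phase 1: the starts 0..d-1 each open a new cycle, phase 2: starts d..n-1 are skipped =====
lemma phase1 (n j : Int) (hn : 0 < n) :
    ∀ (t s : Nat) (seen : PySem.Set Int) (order : List Int),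
      (s : Int) + t = pvD n j →
      (∀ x, x ∈ seen ↔ pvInv n j s x) →
      ∃ seen', (PySem.List.pyRange (s : Int) (pvD n j) 1).foldl
          (fun (st : PySem.Set Int × List Int) start =>
            if PySem.Set.contains st.1 start then st
            else aWhile n j (n.toNat + 1) st.1 st.2 start) (seen, order)
          = (seen', order ++ pvBig n j s t) ∧
        ∀ x, x ∈ seen' ↔ pvInv n j (s + t) x := by
  have hD := pvD_pos n j hn
  have hDn := pvD_le_n n j hn
  intro t
  induction t with
  | zero =>
    intro s seen order hst hinv
    rw [PySem.List.pyRange_one_eq_nil (by omega)]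
    exact ⟨seen, by simp [pvBig], fun x => hinv x⟩
  | succ t ih =>
    intro s seen order hst hinv
    have hsD : (s : Int) < pvD n j := by push_cast at hst ⊢; omega
    have hsn : (s : Int) < n := by omega
    have hsmod : (s : Int) % pvD n j = (s : Int) := Int.emod_eq_of_lt (by positivity) hsD
    have hnotmem : (s : Int) ∉ seen := by
      rw [hinv]
      rintro ⟨_, _, hlt⟩
      rw [hsmod] at hlt
      omega
    have hcf : PySem.Set.contains seen (s : Int) = false :=
      Bool.eq_false_iff.mpr (fun h => hnotmem ((PySem.Set.contains_iff _ _).mp h))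
    rw [PySem.List.pyRange_one_cons hsD, List.foldl_cons]
    simp only [hcf, Bool.false_eq_true, if_false]
    -- run the while loop on the fresh start s
    have hQ : ∀ k, k < pvL n j → ¬ pvInv n j s (pvF n j (s : Int) k) := by
      intro k _ ⟨_, _, hlt⟩
      rw [pvF_mod_D, hsmod] at hlt
      omega
    have hfuel : pvL n j < n.toNat + 1 := by
      have : pvL n j ≤ n.toNat := Nat.div_le_self _ _
      omega
    obtain ⟨seen1, heq1, hinv1⟩ := aWhile_run n j hn (s : Int) (by positivity) hsD
      (pvInv n j s) hQ (pvL n j) 0 (n.toNat + 1) seen order (by omega) hfuel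
      (by intro x; rw [hinv]; constructor
          · exact fun h => Or.inl h
          · rintro (h | ⟨k, hk, _⟩)
            · exact h
            · exact absurd hk (Nat.not_lt_zero k))
    have hstart : (s : Int) = pvF n j (s : Int) 0 := (pvF_zero n j (s : Int) (by positivity) hsn).symm
    rw [← hstart] at heq1
    rw [heq1]
    -- seen1 satisfies the invariant at s+1
    have hinv1' : ∀ x, x ∈ seen1 ↔ pvInv n j (s + 1) x := by
      intro x
      rw [hinv1]
      constructor
      · rintro (⟨hx0, hxn, hlt⟩ | ⟨k, hk, rfl⟩)
        · exact ⟨hx0, hxn, by push_cast; omega⟩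
        · refine ⟨pvF_nonneg n j _ hn k, pvF_lt n j _ hn k, ?_⟩
          rw [pvF_mod_D, hsmod]
          push_cast; omega
      · rintro ⟨hx0, hxn, hlt⟩
        by_cases hcase : x % pvD n j < (s : Int)
        · exact Or.inl ⟨hx0, hxn, hcase⟩
        · have hxs : x % pvD n j = (s : Int) := by push_cast at hlt; omega
          obtain ⟨k, hkL, hkx⟩ := pvF_surj n j (s : Int) x hn (by positivity) hsD hx0 hxn hxs
          exact Or.inr ⟨k, hkL, hkx⟩
    obtain ⟨seen', heq2, hinv2⟩ := ih (s + 1) seen1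
      (order ++ (List.range (pvL n j)).map (fun i => pvF n j (s : Int) (0 + i)))
      (by push_cast at hst ⊢; omega) hinv1'
    have hc1 : ((s + 1 : Nat) : Int) = (s : Int) + 1 := by push_cast; ring
    rw [hc1] at heq2
    refine ⟨seen', ?_, ?_⟩
    · rw [heq2]
      simp only [pvBig]
      rw [List.append_assoc]
      congr 2
      simp [pvOrb]
    · intro x
      rw [hinv2]
      have : s + 1 + t = s + (t + 1) := by omega
      rw [this]

lemma phase2 (n j : Int) :
    ∀ (l : List Int) (seen : PySem.Set Int) (order : List Int),
      (∀ x ∈ l, x ∈ seen) →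
      l.foldl (fun (st : PySem.Set Int × List Int) start =>
          if PySem.Set.contains st.1 start then st
          else aWhile n j (n.toNat + 1) st.1 st.2 start) (seen, order) = (seen, order) := by
  intro l
  induction l with
  | nil => intro seen order _; rfl
  | cons y l ih =>
    intro seen order h
    have hy : PySem.Set.contains seen y = true := (PySem.Set.contains_iff seen y).mpr (h y (by simp))
    simp only [List.foldl_cons, hy, if_pos]
    exact ih seen order (fun x hx => h x (by simp [hx]))

lemma portA_eq_big (n j : Int) (hn : 0 < n) :
    build_modular_order_py n j = pvBig n j 0 (Int.gcd j n) := by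
  have hD := pvD_pos n j hn
  have hDn := pvD_le_n n j hn
  rw [build_modular_order_py]
  rw [PySem.List.pyRange_one_append 0 (pvD n j) n (by omega) hDn, List.foldl_append]
  have hcast : ((0 : Nat) : Int) = (0 : Int) := by norm_num
  obtain ⟨seen1, heq1, hinv1⟩ := phase1 n j hn (Int.gcd j n) 0 PySem.Set.empty []
    (by unfold pvD; push_cast; ring)
    (by intro x
        constructor
        · intro h; cases h
        · rintro ⟨hx0, _, hlt⟩
          have := Int.emod_nonneg x (by omega : pvD n j ≠ 0)
          push_cast at hlt; omega)
  rw [hcast] at heq1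
  rw [heq1]
  rw [phase2 n j (PySem.List.pyRange (pvD n j) n 1) seen1 _ ?_]
  · simp
  · intro x hx
    rw [PySem.List.mem_pyRange_one] at hx
    rw [hinv1]
    exact ⟨by omega, hx.2, by simpa using Int.emod_lt_of_pos x hD⟩

-- ===== B's side =====
lemma gcd_emod (a b : Int) (_hb : 0 < b) : Int.gcd b (a % b) = Int.gcd a b := by
  apply Nat.dvd_antisymm
  · apply Int.dvd_gcd
    · calc ((Int.gcd b (a % b) : Nat) : Int) ∣ b * (a / b) + a % b :=
            Dvd.dvd.add (Dvd.dvd.mul_right (Int.gcd_dvd_left b (a % b)) _) (Int.gcd_dvd_right b (a % b))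
        _ = a := Int.mul_ediv_add_emod a b
    · exact Int.gcd_dvd_left b (a % b)
  · apply Int.dvd_gcd
    · exact Int.gcd_dvd_right a b
    · rw [Int.emod_def]
      exact dvd_sub (Int.gcd_dvd_left a b) (Dvd.dvd.mul_right (Int.gcd_dvd_right a b) _)

lemma bGcd_eq : ∀ (fuel : Nat) (a b : Int), 0 ≤ a → 0 ≤ b → b.toNat < fuel →
    bGcd fuel a b = (Int.gcd a b : Int) := by
  intro fuel
  induction fuel with
  | zero => intro a b _ _ h; omega
  | succ f ih =>
    intro a b ha hb hf
    by_cases h : b = 0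
    · simp [bGcd, h, Int.natAbs_of_nonneg ha]
    · have hbpos : 0 < b := by omega
      have hmod : PySem.Int.mod a b = a % b := PySem.Int.mod_eq_emod_of_pos hbpos
      have h1 : 0 ≤ a % b := Int.emod_nonneg a (by omega)
      have h2 : a % b < b := Int.emod_lt_of_pos a hbpos
      simp only [bGcd, beq_iff_eq, h, if_false, hmod]
      rw [ih b (a % b) hb h1 (by omega), gcd_emod a b hbpos]

lemma bInner_run (n j : Int) (hn : 0 < n) (r : Int) :
    ∀ (t m : Nat) (order : List Int),
      (PySem.List.pyRange 0 (t : Int) 1).foldl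
        (fun (st : List Int × Int) _ => (st.1 ++ [st.2], PySem.Int.mod (st.2 + j) n))
        (order, pvF n j r m)
      = (order ++ (List.range t).map (fun i => pvF n j r (m + i)), pvF n j r (m + t)) := by
  intro t
  induction t with
  | zero => intro m order; simp [PySem.List.pyRange_one_eq_nil]
  | succ t ih =>
    intro m order
    have hc : ((t + 1 : Nat) : Int) = (t : Int) + 1 := by push_cast; ring
    rw [hc, PySem.List.pyRange_one_succ_right (by positivity), List.foldl_append, ih]
    simp only [List.foldl_cons, List.foldl_nil]
    rw [PySem.Int.mod_eq_emod_of_pos hn, pvF_step]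
    rw [Prod.mk.injEq]
    constructor
    · simp [List.range_succ]
    · rfl

lemma bOuter_run (n j : Int) (hn : 0 < n) :
    ∀ (t s : Nat) (order : List Int), (s : Int) + t = pvD n j →
      (PySem.List.pyRange (s : Int) (pvD n j) 1).foldl
        (fun (order : List Int) r =>
          ((PySem.List.pyRange 0 ((pvL n j : Nat) : Int) 1).foldl
            (fun (st : List Int × Int) _ => (st.1 ++ [st.2], PySem.Int.mod (st.2 + j) n))
            (order, r)).1) order
      = order ++ pvBig n j s t := by
  have hDn := pvD_le_n n j hn
  intro t
  induction t with
  | zero =>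
    intro s order hst
    rw [PySem.List.pyRange_one_eq_nil (show pvD n j ≤ (s : Int) by omega)]
    simp [pvBig]
  | succ t ih =>
    intro s order hst
    have hsD : (s : Int) < pvD n j := by push_cast at hst ⊢; omega
    have hsn : (s : Int) < n := by omega
    rw [PySem.List.pyRange_one_cons hsD, List.foldl_cons]
    have hstart : (s : Int) = pvF n j (s : Int) 0 := (pvF_zero n j (s : Int) (by positivity) hsn).symm
    have hbody : ((PySem.List.pyRange 0 ((pvL n j : Nat) : Int) 1).foldl
        (fun (st : List Int × Int) _ => (st.1 ++ [st.2], PySem.Int.mod (st.2 + j) n))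
        (order, (s : Int))).1 = order ++ pvOrb n j (s : Int) := by
      conv_lhs => rw [hstart]
      rw [bInner_run n j hn (s : Int) (pvL n j) 0 order]
      simp [pvOrb]
    rw [hbody]
    have hc1 : (s : Int) + 1 = ((s + 1 : Nat) : Int) := by push_cast; ring
    rw [hc1, ih (s + 1) _ (by push_cast at hst ⊢; omega)]
    simp only [pvBig]
    rw [List.append_assoc]

lemma portB_eq_big (n j : Int) (hn : 0 < n) :
    build_modular_order_py_alt n j = pvBig n j 0 (Int.gcd j n) := by
  have hD := pvD_pos n j hn
  rw [build_modular_order_py_alt, if_neg (by omega)]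
  have hd : bGcd (n.toNat + 1) (PySem.Int.mod j n) n = pvD n j := by
    rw [PySem.Int.mod_eq_emod_of_pos hn,
        bGcd_eq (n.toNat + 1) (j % n) n (Int.emod_nonneg j (by omega)) (by omega) (by omega)]
    unfold pvD
    congr 1
    rw [Int.gcd_comm, gcd_emod j n hn]
  have hL : PySem.Int.floordiv n (pvD n j) = ((pvL n j : Nat) : Int) := by
    have hDnz : pvD n j ≠ 0 := by omega
    rw [PySem.Int.floordiv_eq_ediv_of_pos hD]
    set D := pvD n j with hDdef
    conv_lhs => rw [← pvDL n j hn]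
    rw [← hDdef]
    exact Int.mul_ediv_cancel_left _ hDnz
  simp only [hd, hL]
  have hfin := bOuter_run n j hn (Int.gcd j n) 0 [] (by unfold pvD; push_cast; ring)
  rw [Nat.cast_zero] at hfin
  rw [hfin]
  simp

-- ===== VERDICT (by name: the statement is the Claim_ definition above) =====
theorem build_modular_order_py_spec : Claim_equal_build_modular_order_py := by
  intro n j _
  unfold Spec_build_modular_order_py
  by_cases hn : 0 < n
  · rw [portA_eq_big n j hn, portB_eq_big n j hn]
  · have h1 : n ≤ 0 := by omega
    rw [build_modular_order_py, build_modular_order_py_alt]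
    rw [PySem.List.pyRange_one_eq_nil h1]
    simp [h1]
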